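-- pv_equiv track=rewrite | github.com/aujbl/leetcode | Binary Search/ex1818.py | minAbsoluteSumDiff
-- ===== SOURCE A (Python) =====
-- import bisect
-- from typing import List
--
-- def minAbsoluteSumDiff(nums1: List[int], nums2: List[int]) -> int:
--     rec = nums1.copy()
--     rec.sort()
--     res = max_reduce = 0
--     for num1, num2 in zip(nums1, nums2):
--         diff = abs(num1-num2)
--         res += diff
--         idx = bisect.bisect_left(rec, num2)
--         if idx == 0:
--             min_diff = abs(num2-rec[idx])
--         elif idx == len(rec):
--             min_diff = abs(num2-rec[idx-1])
--         else:
--             min_diff = min(abs(num2-rec[idx-1]), abs(num2-rec[idx]))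
--         max_reduce = max(max_reduce, abs(diff-min_diff))
--     return (res - max_reduce) % (10**9+7)
-- ===== SOURCE B (Python) =====
-- def minAbsoluteSumDiff(nums1, nums2):
--     pairs = list(zip(nums1, nums2))
--     res = sum(abs(a - b) for a, b in pairs)
--     gain = max((abs(a - b) - min(abs(b - x) for x in nums1) for a, b in pairs),
--                default=0)
--     return (res - gain) % (10**9 + 7)
-- ===== Notes on version B (the rewrite author's own statement) =====
-- stated objective: alternative
-- what changed: Replaces A's sort-plus-per-element binary search (bisect_left with a three-way boundary case analysis) by two comprehension passes: the total as a direct sum, and the best reduction as a max over pairs where each element's nearest neighbour is a plain min-scan over nums1 (no sort, no bisect, no boundary cases).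
import Mathlib
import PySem

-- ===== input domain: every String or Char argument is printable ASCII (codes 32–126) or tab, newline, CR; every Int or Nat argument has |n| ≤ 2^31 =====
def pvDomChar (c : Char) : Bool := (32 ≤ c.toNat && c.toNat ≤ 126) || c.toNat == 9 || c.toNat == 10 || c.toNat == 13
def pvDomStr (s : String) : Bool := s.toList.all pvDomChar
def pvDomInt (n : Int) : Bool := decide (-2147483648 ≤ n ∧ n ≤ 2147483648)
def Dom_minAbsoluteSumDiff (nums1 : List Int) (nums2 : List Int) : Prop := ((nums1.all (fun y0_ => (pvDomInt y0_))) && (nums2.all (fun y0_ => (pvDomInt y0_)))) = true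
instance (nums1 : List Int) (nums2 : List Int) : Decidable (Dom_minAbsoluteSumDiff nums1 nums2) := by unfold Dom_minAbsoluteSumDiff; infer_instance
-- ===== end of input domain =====

-- B replaces A's sort + per-element bisect_left (with its three boundary cases) by two
-- comprehension passes whose inner nearest-neighbour search is a plain min-scan over nums1
-- (objective: alternative decomposition, not faster).

-- ===== PORT A =====
-- rec[idx] / rec[idx-1] are only evaluated under branch conditions that put the index in
-- range (and the loop body only runs when rec is nonempty), so List.getD is exact here.
def minAbsoluteSumDiff (nums1 : List Int) (nums2 : List Int) : Int :=
  let rec0 := PySem.List.sorted nums1 (fun x => x)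
  let st := (nums1.zip nums2).foldl (fun (st : Int × Int) p =>
    let diff := |p.1 - p.2|
    let res := st.1 + diff
    let idx := PySem.List.bisectLeft rec0 p.2
    let min_diff :=
      if idx = 0 then |p.2 - rec0.getD idx 0|
      else if idx = rec0.length then |p.2 - rec0.getD (idx - 1) 0|
      else min (|p.2 - rec0.getD (idx - 1) 0|) (|p.2 - rec0.getD idx 0|)
    (res, max st.2 (|diff - min_diff|))) (0, 0)
  PySem.Int.mod (st.1 - st.2) 1000000007

-- ===== PORT B =====
-- min(abs(b - x) for x in nums1); Python's min would raise on an empty nums1, but B only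
-- evaluates it when the pair list is nonempty (so nums1 ≠ []): the [] branch is unreachable.
def pvMinDist (l : List Int) (v : Int) : Int :=
  match l.map (fun x => |v - x|) with
  | [] => 0
  | d :: ds => ds.foldl min d

def minAbsoluteSumDiff_alt (nums1 : List Int) (nums2 : List Int) : Int :=
  let pairs := nums1.zip nums2
  let res := (pairs.map (fun p => |p.1 - p.2|)).sum
  -- max(generator, default=0): 0 on an empty pair list, else the running max of the items
  let gain :=
    match pairs.map (fun p => |p.1 - p.2| - pvMinDist nums1 p.2) with
    | [] => 0
    | g :: gs => gs.foldl max g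
  PySem.Int.mod (res - gain) 1000000007

-- ===== PRECONDITION & SPEC =====
def Spec_minAbsoluteSumDiff (nums1 : List Int) (nums2 : List Int) (out : Int) : Prop := out = minAbsoluteSumDiff_alt nums1 nums2
instance (nums1 : List Int) (nums2 : List Int) (out : Int) : Decidable (Spec_minAbsoluteSumDiff nums1 nums2 out) := by unfold Spec_minAbsoluteSumDiff; infer_instance

-- ===== CLAIM (what is proved, stated in full; the proofs are below) =====
def Claim_equal_minAbsoluteSumDiff : Prop := ∀ (nums1 : List Int) (nums2 : List Int), Dom_minAbsoluteSumDiff nums1 nums2 → Spec_minAbsoluteSumDiff nums1 nums2 (minAbsoluteSumDiff nums1 nums2)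

-- ===== LEMMAS AND PROOFS =====

-- pvMinDist l v is a distance |v - x| with x ∈ l, and is ≤ every such distance.
theorem pvMinDist_mem (l : List Int) (v : Int) (hne : l ≠ []) :
    pvMinDist l v ∈ l.map (fun x => |v - x|) := by
  cases l with
  | nil => exact absurd rfl hne
  | cons a t =>
    simp only [pvMinDist, List.map_cons]
    rcases PySem.List.foldl_min_mem (t.map (fun x => |v - x|)) (|v - a|) with h | h
    · rw [h]; exact List.mem_cons_self
    · exact List.mem_cons_of_mem _ h

theorem pvMinDist_le (l : List Int) (v : Int) {x : Int} (hx : x ∈ l) :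
    pvMinDist l v ≤ |v - x| := by
  cases l with
  | nil => simp at hx
  | cons a t =>
    simp only [pvMinDist, List.map_cons]
    rcases List.mem_cons.mp hx with rfl | hx
    · exact (PySem.List.foldl_min_le _ _).1
    · exact (PySem.List.foldl_min_le _ _).2 _ (List.mem_map_of_mem hx)

theorem pvMinDist_eq (l : List Int) (v m : Int) (hne : l ≠ [])
    (hm : m ∈ l.map (fun x => |v - x|)) (hle : ∀ x ∈ l, m ≤ |v - x|) :
    pvMinDist l v = m := by
  rcases List.mem_map.mp (pvMinDist_mem l v hne) with ⟨x, hx, hdx⟩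
  rcases List.mem_map.mp hm with ⟨y, hy, hdy⟩
  exact le_antisymm (hdy ▸ pvMinDist_le l v hy) (hdx ▸ hle x hx)

theorem pvMinDist_perm (l₁ l₂ : List Int) (v : Int) (h : l₁.Perm l₂) (hne : l₁ ≠ []) :
    pvMinDist l₁ v = pvMinDist l₂ v := by
  have hne₂ : l₂ ≠ [] := by intro h2; exact hne (List.Perm.eq_nil (h2 ▸ h))
  refine pvMinDist_eq l₁ v _ hne ?_ ?_
  · exact ((h.map (fun x => |v - x|)).mem_iff).mpr (pvMinDist_mem l₂ v hne₂)
  · intro x hx; exact pvMinDist_le l₂ v (h.mem_iff.mp hx)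

-- A's bisect-based nearest-distance expression equals the min-scan, on a sorted list.
theorem chain_eq (r : List Int) (v : Int) (hpw : r.Pairwise (· ≤ ·)) (hr : r ≠ []) :
    (if PySem.List.bisectLeft r v = 0 then |v - r.getD (PySem.List.bisectLeft r v) 0|
     else if PySem.List.bisectLeft r v = r.length then |v - r.getD (PySem.List.bisectLeft r v - 1) 0|
     else min (|v - r.getD (PySem.List.bisectLeft r v - 1) 0|) (|v - r.getD (PySem.List.bisectLeft r v) 0|))
    = pvMinDist r v := by
  obtain ⟨hle, hlt, hge⟩ := PySem.List.bisectLeft_spec r v hpw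
  set idx := PySem.List.bisectLeft r v with hidx
  have hn : 0 < r.length := List.length_pos_iff.mpr hr
  have mono : ∀ (p q : ℕ) (hp : p < r.length) (hq : q < r.length), p ≤ q → r[p] ≤ r[q] := by
    intro p q hp hq hpq
    rcases Nat.lt_or_ge p q with h | h
    · exact List.pairwise_iff_getElem.mp hpw p q hp hq h
    · have : p = q := le_antisymm hpq h
      subst this; exact le_refl _
  have hbound : ∀ (j : ℕ) (hj : j < r.length), (if idx = 0 then |v - r.getD idx 0|
      else if idx = r.length then |v - r.getD (idx - 1) 0|
      else min (|v - r.getD (idx - 1) 0|) (|v - r.getD idx 0|)) ≤ |v - r[j]| := by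
    intro j hj
    by_cases h0 : idx = 0
    · rw [if_pos h0]
      have h0j : v ≤ r[j] := hge j hj (by omega)
      have h00 : v ≤ r[0] := hge 0 hn (by omega)
      rw [h0, List.getD_eq_getElem r 0 hn]
      have hm : r[0] ≤ r[j] := mono 0 j hn hj (Nat.zero_le _)
      rw [abs_of_nonpos (by omega), abs_of_nonpos (by omega)]; omega
    · by_cases hl : idx = r.length
      · rw [if_neg h0, if_pos hl]
        have hjlt : r[j] < v := hlt j hj (by omega)
        have hi1 : idx - 1 < r.length := by omega
        have hlast : r[idx - 1] < v := hlt (idx - 1) hi1 (by omega)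
        rw [List.getD_eq_getElem r 0 hi1]
        have hm : r[j] ≤ r[idx - 1] := mono j (idx - 1) hj hi1 (by omega)
        rw [abs_of_nonneg (by omega), abs_of_nonneg (by omega)]; omega
      · rw [if_neg h0, if_neg hl]
        have hi1 : idx - 1 < r.length := by omega
        have hi : idx < r.length := by omega
        rw [List.getD_eq_getElem r 0 hi1, List.getD_eq_getElem r 0 hi]
        rcases Nat.lt_or_ge j idx with hji | hji
        · refine le_trans (min_le_left _ _) ?_
          have h1 : r[idx - 1] < v := hlt (idx - 1) hi1 (by omega)
          have h2 : r[j] < v := hlt j hj hji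
          have hm : r[j] ≤ r[idx - 1] := mono j (idx - 1) hj hi1 (by omega)
          rw [abs_of_nonneg (by omega), abs_of_nonneg (by omega)]; omega
        · refine le_trans (min_le_right _ _) ?_
          have h1 : v ≤ r[idx] := hge idx hi (le_refl _)
          have h2 : v ≤ r[j] := hge j hj hji
          have hm : r[idx] ≤ r[j] := mono idx j hi hj hji
          rw [abs_of_nonpos (by omega), abs_of_nonpos (by omega)]; omega
  have hmem : (if idx = 0 then |v - r.getD idx 0|
      else if idx = r.length then |v - r.getD (idx - 1) 0|
      else min (|v - r.getD (idx - 1) 0|) (|v - r.getD idx 0|)) ∈ r.map (fun x => |v - x|) := by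
    by_cases h0 : idx = 0
    · rw [if_pos h0]
      rw [h0, List.getD_eq_getElem r 0 hn]
      exact List.mem_map_of_mem (List.getElem_mem hn)
    · by_cases hl : idx = r.length
      · rw [if_neg h0, if_pos hl]
        have hi1 : idx - 1 < r.length := by omega
        rw [List.getD_eq_getElem r 0 hi1]
        exact List.mem_map_of_mem (List.getElem_mem hi1)
      · rw [if_neg h0, if_neg hl]
        have hi1 : idx - 1 < r.length := by omega
        have hi : idx < r.length := by omega
        rw [List.getD_eq_getElem r 0 hi1, List.getD_eq_getElem r 0 hi]
        rcases min_choice (|v - r[idx - 1]|) (|v - r[idx]|) with h | h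
        · rw [h]; exact List.mem_map_of_mem (List.getElem_mem hi1)
        · rw [h]; exact List.mem_map_of_mem (List.getElem_mem hi)
  refine (pvMinDist_eq r v _ hr hmem ?_).symm
  intro x hx
  rcases List.mem_iff_getElem.mp hx with ⟨j, hj, rfl⟩
  exact hbound j hj

-- A's single loop splits into a sum and a running max over the same pair list.
theorem foldPair (f g : Int × Int → Int) (l : List (Int × Int)) (r m : Int) :
    l.foldl (fun st p => (st.1 + f p, max st.2 (g p))) (r, m)
      = (r + (l.map f).sum, (l.map g).foldl max m) := by
  induction l generalizing r m with
  | nil => simp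
  | cons p t ih => simp [ih, add_assoc]

theorem gainFold (g : Int × Int → Int) (l : List (Int × Int)) (hg : ∀ p ∈ l, 0 ≤ g p) :
    (l.map g).foldl max 0
      = (match l.map g with | [] => (0 : Int) | x :: xs => xs.foldl max x) := by
  cases l with
  | nil => simp
  | cons p t =>
    simp only [List.map_cons, List.foldl_cons]
    rw [max_eq_right (hg p List.mem_cons_self)]

theorem minAbsoluteSumDiff_spec' : ∀ (nums1 nums2 : List Int),
    minAbsoluteSumDiff nums1 nums2 = minAbsoluteSumDiff_alt nums1 nums2 := by
  intro nums1 nums2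
  unfold minAbsoluteSumDiff minAbsoluteSumDiff_alt
  simp only []
  rw [foldPair (fun p => |p.1 - p.2|)
      (fun p => |(|p.1 - p.2|) -
        (if PySem.List.bisectLeft (PySem.List.sorted nums1 (fun x => x)) p.2 = 0 then
          |p.2 - (PySem.List.sorted nums1 (fun x => x)).getD (PySem.List.bisectLeft (PySem.List.sorted nums1 (fun x => x)) p.2) 0|
        else if PySem.List.bisectLeft (PySem.List.sorted nums1 (fun x => x)) p.2 = (PySem.List.sorted nums1 (fun x => x)).length then
          |p.2 - (PySem.List.sorted nums1 (fun x => x)).getD (PySem.List.bisectLeft (PySem.List.sorted nums1 (fun x => x)) p.2 - 1) 0|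
        else min (|p.2 - (PySem.List.sorted nums1 (fun x => x)).getD (PySem.List.bisectLeft (PySem.List.sorted nums1 (fun x => x)) p.2 - 1) 0|)
                 (|p.2 - (PySem.List.sorted nums1 (fun x => x)).getD (PySem.List.bisectLeft (PySem.List.sorted nums1 (fun x => x)) p.2) 0|))|)]
  simp only [zero_add]
  congr 1
  by_cases hz : nums1.zip nums2 = []
  · simp [hz]
  have hne : nums1 ≠ [] := by
    intro h; subst h; simp at hz
  have hkey : ∀ p ∈ nums1.zip nums2,
      (if PySem.List.bisectLeft (PySem.List.sorted nums1 (fun x => x)) p.2 = 0 then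
          |p.2 - (PySem.List.sorted nums1 (fun x => x)).getD (PySem.List.bisectLeft (PySem.List.sorted nums1 (fun x => x)) p.2) 0|
        else if PySem.List.bisectLeft (PySem.List.sorted nums1 (fun x => x)) p.2 = (PySem.List.sorted nums1 (fun x => x)).length then
          |p.2 - (PySem.List.sorted nums1 (fun x => x)).getD (PySem.List.bisectLeft (PySem.List.sorted nums1 (fun x => x)) p.2 - 1) 0|
        else min (|p.2 - (PySem.List.sorted nums1 (fun x => x)).getD (PySem.List.bisectLeft (PySem.List.sorted nums1 (fun x => x)) p.2 - 1) 0|)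
                 (|p.2 - (PySem.List.sorted nums1 (fun x => x)).getD (PySem.List.bisectLeft (PySem.List.sorted nums1 (fun x => x)) p.2) 0|))
        = pvMinDist nums1 p.2 := by
    intro p _
    have hperm : (PySem.List.sorted nums1 (fun x => x)).Perm nums1 :=
      PySem.List.sorted_perm nums1 (fun x => x) false
    have hrne : PySem.List.sorted nums1 (fun x => x) ≠ [] := by
      intro h; exact hne (List.Perm.eq_nil (h ▸ hperm.symm))
    have hpw : (PySem.List.sorted nums1 (fun x => x)).Pairwise (· ≤ ·) :=
      PySem.List.sorted_pairwise nums1 (fun x => x)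
    rw [chain_eq _ _ hpw hrne]
    exact pvMinDist_perm _ _ _ hperm hrne
  have habs : ∀ p ∈ nums1.zip nums2, pvMinDist nums1 p.2 ≤ |p.1 - p.2| := by
    intro p hp
    obtain ⟨a, b⟩ := p
    have h1 : a ∈ nums1 := (List.of_mem_zip hp).1
    calc pvMinDist nums1 b ≤ |b - a| := pvMinDist_le nums1 b h1
      _ = |a - b| := abs_sub_comm _ _
  have hmaps : (nums1.zip nums2).map (fun p => |(|p.1 - p.2|) -
      (if PySem.List.bisectLeft (PySem.List.sorted nums1 (fun x => x)) p.2 = 0 then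
          |p.2 - (PySem.List.sorted nums1 (fun x => x)).getD (PySem.List.bisectLeft (PySem.List.sorted nums1 (fun x => x)) p.2) 0|
        else if PySem.List.bisectLeft (PySem.List.sorted nums1 (fun x => x)) p.2 = (PySem.List.sorted nums1 (fun x => x)).length then
          |p.2 - (PySem.List.sorted nums1 (fun x => x)).getD (PySem.List.bisectLeft (PySem.List.sorted nums1 (fun x => x)) p.2 - 1) 0|
        else min (|p.2 - (PySem.List.sorted nums1 (fun x => x)).getD (PySem.List.bisectLeft (PySem.List.sorted nums1 (fun x => x)) p.2 - 1) 0|)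
                 (|p.2 - (PySem.List.sorted nums1 (fun x => x)).getD (PySem.List.bisectLeft (PySem.List.sorted nums1 (fun x => x)) p.2) 0|))|)
      = (nums1.zip nums2).map (fun p => |p.1 - p.2| - pvMinDist nums1 p.2) := by
    apply List.map_congr_left
    intro p hp
    rw [hkey p hp, abs_of_nonneg (by have := habs p hp; omega)]
  have hg0 : ∀ p ∈ nums1.zip nums2, (0:Int) ≤ |p.1 - p.2| - pvMinDist nums1 p.2 := by
    intro p hp
    have := habs p hp
    omega
  rw [hmaps, gainFold (fun p => |p.1 - p.2| - pvMinDist nums1 p.2) (nums1.zip nums2) hg0]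

-- ===== VERDICT (by name: the statement is the Claim_ definition above) =====
theorem minAbsoluteSumDiff_spec : Claim_equal_minAbsoluteSumDiff := by
  intro nums1 nums2 _
  exact minAbsoluteSumDiff_spec' nums1 nums2
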